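-- pv_equiv track=rewrite | github.com/ershehzan/FlowForge-AI | evaluation/evaluator.py | machine_idle_time
-- ===== SOURCE A (Python) =====
-- def machine_idle_time(assignments, machines):
--     idle = {m: 0 for m in machines}
--     tasks_by_machine = {m: [] for m in machines}
--
--     for t in assignments:
--         tasks_by_machine[t['machine']].append(t)
--
--     for m in machines:
--         tasks = sorted(tasks_by_machine[m], key=lambda x: x['start'])
--         prev_end = 0
--         for t in tasks:
--             idle[m] += max(0, t['start'] - prev_end)
--             prev_end = t['start'] + t['duration']
--
--     return idle
-- ===== SOURCE B (Python) =====
-- def machine_idle_time(assignments, machines):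
--     result = {}
--     for m in machines:
--         pairs = sorted(((t['start'], t['duration']) for t in assignments if t['machine'] == m),
--                        key=lambda p: p[0])
--         ends = [0] + [s + d for s, d in pairs]
--         result[m] = sum(max(0, s - e) for (s, _), e in zip(pairs, ends))
--     return result
-- ===== Notes on version B (the rewrite author's own statement) =====
-- stated objective: alternative
-- what changed: B drops A's grouping dicts and running prev_end accumulator: per machine it filters the assignments to sorted (start,duration) pairs and computes the idle as a zip-sum of gaps between each start and the previous task's end, since prev_end is just the preceding task's start+duration.
-- outside the precondition, e.g. on machine_idle_time([{'machine': 1, 'start': 5, 'duration': 1}], [1, 1]): A returns {1: 10}, B returns {1: 5}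
import Mathlib
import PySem

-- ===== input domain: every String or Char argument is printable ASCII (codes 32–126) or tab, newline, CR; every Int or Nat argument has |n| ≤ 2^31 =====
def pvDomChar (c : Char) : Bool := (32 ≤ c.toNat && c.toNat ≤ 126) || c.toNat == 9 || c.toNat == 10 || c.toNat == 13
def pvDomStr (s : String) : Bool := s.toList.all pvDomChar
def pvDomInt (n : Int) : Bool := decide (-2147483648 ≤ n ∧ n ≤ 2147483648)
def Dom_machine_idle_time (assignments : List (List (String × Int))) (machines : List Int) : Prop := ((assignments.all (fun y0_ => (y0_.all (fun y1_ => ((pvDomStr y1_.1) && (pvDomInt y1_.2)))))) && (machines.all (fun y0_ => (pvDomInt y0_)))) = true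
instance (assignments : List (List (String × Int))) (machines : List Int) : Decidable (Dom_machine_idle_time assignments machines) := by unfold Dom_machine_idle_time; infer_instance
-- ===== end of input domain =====

-- B drops A's grouping dicts and running prev_end accumulator: per machine it builds sorted
-- (start,duration) pairs and sums the gaps between each start and the previous end via a zip;
-- return value only (neither program mutates its arguments).

-- t[k] for a task dict t (Pre_ guarantees the key is present wherever it is read)
def tget (t : List (String × Int)) (k : String) : Int := (PySem.Dict.mk t).getD k 0

-- ===== PORT A =====
def machine_idle_time (assignments : List (List (String × Int))) (machines : List Int) : List (Int × Int) :=
  let idle0 : PySem.Dict Int Int := machines.foldl (fun d m => d.insert m 0) PySem.Dict.empty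
  let tbm0 : PySem.Dict Int (List (List (String × Int))) :=
    machines.foldl (fun d m => d.insert m []) PySem.Dict.empty
  let tbm := assignments.foldl (fun d t => d.modify (tget t "machine") [] (fun l => l ++ [t])) tbm0
  let idle := machines.foldl (fun d m =>
    let tasks := PySem.List.sorted (tbm.getD m []) (fun x => tget x "start") false
    (tasks.foldl (fun (st : PySem.Dict Int Int × Int) t =>
        (st.1.modify m 0 (fun v => v + max 0 (tget t "start" - st.2)),
         tget t "start" + tget t "duration")) (d, 0)).1) idle0
  idle.items

-- ===== PORT B =====
def machine_idle_time_alt (assignments : List (List (String × Int))) (machines : List Int) : List (Int × Int) :=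
  (machines.foldl (fun (result : PySem.Dict Int Int) m =>
      let pairs := PySem.List.sorted
        ((assignments.filter (fun t => tget t "machine" == m)).map
          (fun t => (tget t "start", tget t "duration")))
        (fun p => p.1) false
      let ends : List Int := 0 :: pairs.map (fun p => p.1 + p.2)
      result.insert m (((pairs.zip ends).map (fun pe => max 0 (pe.1.1 - pe.2))).sum))
    PySem.Dict.empty).items

-- ===== PRECONDITION & SPEC =====
-- Pre_ excludes (a) assignments whose dict lacks a 'machine'/'start'/'duration' key or whose machine
-- is not in machines (A raises KeyError there), and (b) tasks assigned to a machine id listed more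
-- than once in machines, a defensible duplicate-keys corner on which A re-accumulates that machine's
-- idle once per occurrence of the id while B counts it once.
def Pre_machine_idle_time (assignments : List (List (String × Int))) (machines : List Int) : Prop :=
  ∀ t ∈ assignments,
    (PySem.Dict.mk t).contains "machine" = true ∧
    machines.count ((PySem.Dict.mk t).getD "machine" 0) = 1 ∧
    (PySem.Dict.mk t).contains "start" = true ∧
    (PySem.Dict.mk t).contains "duration" = true
instance (assignments : List (List (String × Int))) (machines : List Int) : Decidable (Pre_machine_idle_time assignments machines) := by unfold Pre_machine_idle_time; infer_instance

def pvWitness_machine_idle_time : (List (List (String × Int))) × List Int :=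
  ([[("machine", 1), ("start", 4), ("duration", 2)], [("machine", 2), ("start", 3), ("duration", 1)]], [1, 2])

def Spec_machine_idle_time (assignments : List (List (String × Int))) (machines : List Int) (out : List (Int × Int)) : Prop := out = machine_idle_time_alt assignments machines
instance (assignments : List (List (String × Int))) (machines : List Int) (out : List (Int × Int)) : Decidable (Spec_machine_idle_time assignments machines out) := by unfold Spec_machine_idle_time; infer_instance

-- ===== CLAIM (what is proved, stated in full; the proofs are below) =====
def Claim_equal_machine_idle_time : Prop := ∀ (assignments : List (List (String × Int))) (machines : List Int), Dom_machine_idle_time assignments machines → Pre_machine_idle_time assignments machines → Spec_machine_idle_time assignments machines (machine_idle_time assignments machines)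

-- ===== LEMMAS AND PROOFS =====

-- abbreviations used only by the proofs
def gM (t : List (String × Int)) : Int := tget t "machine"
def fSD (t : List (String × Int)) : Int × Int := (tget t "start", tget t "duration")

-- the per-machine scalar loop A reduces to
def run (ts : List (List (String × Int))) (a e : Int) : Int × Int :=
  ts.foldl (fun p t => (p.1 + max 0 (tget t "start" - p.2), tget t "start" + tget t "duration")) (a, e)

-- gap sum over (start,duration) pairs with a previous end
def gsum : List (Int × Int) → Int → Int
  | [], _ => 0
  | (s, d) :: rest, prev => max 0 (s - prev) + gsum rest (s + d)

-- initial dicts: lookup and membership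
theorem init_getD_aux {ν : Type} [DecidableEq ν] (ms : List Int) (v : ν) (c : Int)
    (d : PySem.Dict Int ν) (h : d.getD c v = v) :
    (ms.foldl (fun d m => d.insert m v) d).getD c v = v := by
  induction ms generalizing d with
  | nil => exact h
  | cons m ms ih =>
    simp only [List.foldl_cons]
    exact ih _ (by rw [PySem.Dict.getD_insert]; split <;> simp [h])

theorem init_getD (machines : List Int) (v : Int) (c : Int) :
    (machines.foldl (fun d m => d.insert m v) PySem.Dict.empty).getD c v = v :=
  init_getD_aux machines v c _ (by simp [PySem.Dict.getD_empty])

theorem init_getD_nil (machines : List Int) (c : Int) :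
    (machines.foldl (fun d m => d.insert m ([] : List (List (String × Int)))) PySem.Dict.empty).getD c [] = [] :=
  init_getD_aux machines [] c _ (by simp [PySem.Dict.getD_empty])

theorem init_keys (machines : List Int) (v : Int) :
    (machines.foldl (fun d m => d.insert m v) PySem.Dict.empty).keys = PySem.Set.ofList machines := by
  rw [PySem.Dict.keys_foldl_insert machines (fun _ _ => v) PySem.Dict.empty]
  rw [show (PySem.Dict.empty : PySem.Dict Int Int).keys = [] from rfl]
  rw [PySem.Set.update_nil_left]

-- grouping loop of A: the bucket of machine c is the filter of the assignments
theorem tbm_getD (assignments : List (List (String × Int))) (machines : List Int) (c : Int) :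
    ((assignments.foldl (fun d t => d.modify (tget t "machine") [] (fun l => l ++ [t]))
        (machines.foldl (fun d m => d.insert m []) PySem.Dict.empty)).getD c [])
      = assignments.filter (fun t => gM t == c) := by
  have h1 : assignments.foldl (fun d t => d.modify (tget t "machine") [] (fun l => l ++ [t]))
        (machines.foldl (fun d m => d.insert m []) PySem.Dict.empty)
      = (assignments.map (fun t => (tget t "machine", t))).foldl
          (fun d p => d.modify p.1 [] (fun l => l ++ [p.2]))
          (machines.foldl (fun d m => d.insert m []) PySem.Dict.empty) := by
    rw [List.foldl_map]
  rw [h1, PySem.Dict.getD_foldl_modify_append, init_getD_nil, List.filter_map]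
  simp [gM, Function.comp_def]

-- A's inner loop: only key m changes, by the scalar run
theorem A_inner (m : Int) (ts : List (List (String × Int))) (d : PySem.Dict Int Int) (e : Int) (c : Int) :
    ((ts.foldl (fun (st : PySem.Dict Int Int × Int) t =>
        (st.1.modify m 0 (fun v => v + max 0 (tget t "start" - st.2)),
         tget t "start" + tget t "duration")) (d, e)).1).getD c 0
      = if c = m then (run ts (d.getD m 0) e).1 else d.getD c 0 := by
  induction ts generalizing d e with
  | nil => simp only [List.foldl_nil, run]; split <;> simp_all
  | cons t ts ih =>
    simp only [List.foldl_cons]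
    rw [ih]
    by_cases hcm : c = m
    · subst hcm
      simp [run, PySem.Dict.getD_modify_self]
    · simp only [hcm, if_false]
      exact PySem.Dict.getD_modify_of_ne d 0 _ hcm

theorem A_inner_keys (m : Int) (ts : List (List (String × Int))) (d : PySem.Dict Int Int) (e : Int)
    (hc : d.contains m = true) :
    ((ts.foldl (fun (st : PySem.Dict Int Int × Int) t =>
        (st.1.modify m 0 (fun v => v + max 0 (tget t "start" - st.2)),
         tget t "start" + tget t "duration")) (d, e)).1).keys = d.keys := by
  induction ts generalizing d e with
  | nil => rfl
  | cons t ts ih =>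
    simp only [List.foldl_cons]
    rw [ih _ _ (by simp [PySem.Dict.contains_modify, hc])]
    rw [PySem.Dict.keys_modify, PySem.Dict.keys_insert_of_contains _ _ hc]

-- A's outer loop over the machines
theorem A_outer (ms : List Int)
    (tbm : PySem.Dict Int (List (List (String × Int)))) (d : PySem.Dict Int Int) (c : Int)
    (hbuck : 1 < ms.count c → tbm.getD c [] = []) :
    ((ms.foldl (fun d m =>
        let tasks := PySem.List.sorted (tbm.getD m []) (fun x => tget x "start") false
        (tasks.foldl (fun (st : PySem.Dict Int Int × Int) t =>
            (st.1.modify m 0 (fun v => v + max 0 (tget t "start" - st.2)),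
             tget t "start" + tget t "duration")) (d, 0)).1) d).getD c 0)
      = if c ∈ ms then
          (run (PySem.List.sorted (tbm.getD c []) (fun x => tget x "start") false) (d.getD c 0) 0).1
        else d.getD c 0 := by
  revert hbuck
  induction ms generalizing d with
  | nil => intro _; simp
  | cons m ms ih =>
    intro hbuck
    simp only [List.foldl_cons]
    rw [ih _ (fun h1 => hbuck (lt_of_lt_of_le h1 (by
      rw [List.count_cons]; omega)))]
    by_cases hc : c = m
    · subst hc
      by_cases hmem : c ∈ ms
      · have hb : tbm.getD c [] = [] := by
          apply hbuck
          rw [List.count_cons_self]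
          have := List.count_pos_iff.mpr hmem
          omega
        have hs : PySem.List.sorted ([] : List (List (String × Int)))
            (fun x => tget x "start") false = [] := rfl
        simp [hb, hmem, run, hs]
      · simp [hmem, A_inner]
    · simp [A_inner, hc, List.mem_cons]

theorem A_outer_keys (ms : List Int)
    (tbm : PySem.Dict Int (List (List (String × Int)))) (d : PySem.Dict Int Int)
    (h : ∀ m ∈ ms, d.contains m = true) :
    ((ms.foldl (fun d m =>
        let tasks := PySem.List.sorted (tbm.getD m []) (fun x => tget x "start") false
        (tasks.foldl (fun (st : PySem.Dict Int Int × Int) t =>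
            (st.1.modify m 0 (fun v => v + max 0 (tget t "start" - st.2)),
             tget t "start" + tget t "duration")) (d, 0)).1) d).keys) = d.keys := by
  induction ms generalizing d with
  | nil => rfl
  | cons m ms ih =>
    simp only [List.foldl_cons]
    rw [ih _ ?_, A_inner_keys _ _ _ _ (h m (by simp))]
    intro u hu
    rw [PySem.Dict.contains_iff_mem_keys] at *
    rw [A_inner_keys _ _ _ _ ?_]
    · exact (PySem.Dict.contains_iff_mem_keys _ _).mp (h u (List.mem_cons_of_mem _ hu))
    · exact h m (by simp)

-- the common canonical value of both programs
def canon (assignments : List (List (String × Int))) (machines : List Int) : List (Int × Int) :=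
  (PySem.Set.ofList machines).map (fun c => (c,
    (run (PySem.List.sorted (assignments.filter (fun t => gM t == c)) (fun x => tget x "start") false) 0 0).1))

theorem A_items (assignments : List (List (String × Int))) (machines : List Int)
    (hbuck : ∀ c : Int, 1 < machines.count c → assignments.filter (fun t => gM t == c) = []) :
    machine_idle_time assignments machines = canon assignments machines := by
  unfold machine_idle_time
  dsimp only
  have hik : (machines.foldl (fun d m => d.insert m (0 : Int)) PySem.Dict.empty).keys
      = PySem.Set.ofList machines := init_keys machines 0
  have hcont : ∀ m ∈ machines,
      (machines.foldl (fun d m => d.insert m (0 : Int)) PySem.Dict.empty).contains m = true := by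
    intro m hm
    rw [PySem.Dict.contains_iff_mem_keys, hik]
    exact (PySem.Set.mem_ofList _ _).mpr hm
  have hkA := A_outer_keys machines
    (assignments.foldl (fun d t => d.modify (tget t "machine") [] (fun l => l ++ [t]))
      (machines.foldl (fun d m => d.insert m []) PySem.Dict.empty))
    (machines.foldl (fun d m => d.insert m 0) PySem.Dict.empty) hcont
  rw [PySem.Dict.items_eq_map_keys _ (by rw [hkA, hik]; exact PySem.Set.nodup_ofList machines) 0,
      hkA, hik]
  unfold canon
  apply List.map_congr_left
  intro c hc
  rw [A_outer machines _ _ c (by intro h1; rw [tbm_getD]; exact hbuck c h1),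
      if_pos ((PySem.Set.mem_ofList _ _).mp hc), init_getD, tbm_getD]

-- B side: the zip-sum of gaps is the gap sum
theorem zip_gsum (ps : List (Int × Int)) (e : Int) :
    ((ps.zip (e :: ps.map (fun p => p.1 + p.2))).map (fun pe => max 0 (pe.1.1 - pe.2))).sum
      = gsum ps e := by
  induction ps generalizing e with
  | nil => rfl
  | cons p rest ih =>
    obtain ⟨s, d⟩ := p
    simp only [List.map_cons, List.zip_cons_cons, List.sum_cons, gsum]
    rw [ih]

-- the scalar run of A equals the gap sum over the projected pairs
theorem run_gsum (ts : List (List (String × Int))) (a e : Int) :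
    (run ts a e).1 = a + gsum (ts.map fSD) e := by
  induction ts generalizing a e with
  | nil => simp [run, gsum]
  | cons t ts ih =>
    simp only [run, List.foldl_cons, List.map_cons, fSD, gsum] at *
    rw [ih]
    ring

-- insertion into a mapped list commutes with mapping
theorem insertBy_map (x : List (String × Int)) (acc : List (List (String × Int))) :
    PySem.List.insertBy (fun a b => decide (a.1 < b.1)) (fSD x) (acc.map fSD)
      = (PySem.List.insertBy (fun a b => decide (tget a "start" < tget b "start")) x acc).map fSD := by
  induction acc with
  | nil => rfl
  | cons y ys ih =>
    simp only [List.map_cons, PySem.List.insertBy]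
    by_cases h : tget x "start" < tget y "start"
    · simp [fSD, h]
    · simp only [fSD, h, decide_false, Bool.false_eq_true, if_false, List.map_cons]
      rw [← ih]
      rfl

-- a stable sort of the projected pairs is the projection of the stable sort
theorem sorted_map_fSD (l : List (List (String × Int))) :
    PySem.List.sorted (l.map fSD) (fun p => p.1) false
      = (PySem.List.sorted l (fun x => tget x "start") false).map fSD := by
  have main : ∀ (l acc : List (List (String × Int))),
      (l.map fSD).foldl (fun acc x => PySem.List.insertBy (fun a b => decide (a.1 < b.1)) x acc)
          (acc.map fSD)
        = (l.foldl (fun acc x =>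
            PySem.List.insertBy (fun a b => decide (tget a "start" < tget b "start")) x acc) acc).map fSD := by
    intro l
    induction l with
    | nil => intro acc; rfl
    | cons x l ih =>
      intro acc
      simp only [List.map_cons, List.foldl_cons]
      rw [insertBy_map, ih]
  rw [PySem.List.sorted_eq_foldl_insertBy, PySem.List.sorted_eq_foldl_insertBy]
  simpa using main l []

-- B's result dict built by repeated insert: lookup
theorem ins_getD (ms : List Int) (val : Int → Int) (d : PySem.Dict Int Int) (c : Int) :
    (ms.foldl (fun r m => r.insert m (val m)) d).getD c 0
      = if c ∈ ms then val c else d.getD c 0 := by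
  induction ms generalizing d with
  | nil => simp
  | cons m ms ih =>
    simp only [List.foldl_cons]
    rw [ih]
    by_cases hms : c ∈ ms
    · simp [hms, List.mem_cons]
    · by_cases hcm : c = m
      · subst hcm; simp [hms, PySem.Dict.getD_insert_self]
      · simp only [hms, if_false, List.mem_cons, hcm, false_or]
        rw [PySem.Dict.getD_insert]
        simp [hcm]

theorem B_items (assignments : List (List (String × Int))) (machines : List Int) :
    machine_idle_time_alt assignments machines = canon assignments machines := by
  unfold machine_idle_time_alt
  dsimp only
  have hk : (machines.foldl (fun (result : PySem.Dict Int Int) m =>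
      result.insert m ((((PySem.List.sorted
        ((assignments.filter (fun t => tget t "machine" == m)).map
          (fun t => (tget t "start", tget t "duration"))) (fun p => p.1) false).zip
        (0 :: (PySem.List.sorted
        ((assignments.filter (fun t => tget t "machine" == m)).map
          (fun t => (tget t "start", tget t "duration"))) (fun p => p.1) false).map
          (fun p => p.1 + p.2))).map (fun pe => max 0 (pe.1.1 - pe.2))).sum))
      PySem.Dict.empty).keys = PySem.Set.ofList machines := by
    rw [PySem.Dict.keys_foldl_insert machines _ PySem.Dict.empty]
    rw [show (PySem.Dict.empty : PySem.Dict Int Int).keys = [] from rfl]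
    rw [PySem.Set.update_nil_left]
  rw [PySem.Dict.items_eq_map_keys _ (by rw [hk]; exact PySem.Set.nodup_ofList machines) 0, hk]
  unfold canon
  apply List.map_congr_left
  intro c hc
  rw [ins_getD, if_pos ((PySem.Set.mem_ofList _ _).mp hc)]
  congr 1
  rw [show (fun t => (tget t "start", tget t "duration")) = fSD from rfl,
      sorted_map_fSD, zip_gsum, run_gsum]
  simp [gM]

-- ===== VERDICT (by name: the statement is the Claim_ definition above) =====
theorem machine_idle_time_spec : Claim_equal_machine_idle_time := by
  intro assignments machines _ hpre
  unfold Spec_machine_idle_time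
  have hbuck : ∀ c : Int, 1 < machines.count c → assignments.filter (fun t => gM t == c) = [] := by
    intro c h1
    rw [List.filter_eq_nil_iff]
    intro t ht hgt
    have := (hpre t ht).2.1
    rw [show gM t = (PySem.Dict.mk t).getD "machine" 0 from rfl] at hgt
    rw [(beq_iff_eq).mp hgt] at this
    omega
  rw [A_items assignments machines hbuck, B_items assignments machines]
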